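-- pv_equiv track=rewrite | github.com/tleong02/PixelPaws | evaluation_tab.py | _apply_bout_filtering
-- ===== SOURCE A (Python) =====
-- def _apply_bout_filtering(y_pred, min_bout, min_after_bout, max_gap):
--     """Apply bout filtering: min-bout removal and gap bridging."""
--     y_filtered = y_pred.copy()
--
--     # --- min_bout: remove bouts shorter than threshold ---
--     in_bout = False
--     bout_start = 0
--     for i in range(len(y_filtered)):
--         if y_filtered[i] == 1 and not in_bout:
--             bout_start = i
--             in_bout = True
--         elif y_filtered[i] == 0 and in_bout:
--             if (i - bout_start) < min_bout:
--                 y_filtered[bout_start:i] = 0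
--             in_bout = False
--     if in_bout and (len(y_filtered) - bout_start) < min_bout:
--         y_filtered[bout_start:] = 0
--
--     # --- max_gap: bridge short gaps between bouts ---
--     if max_gap > 0:
--         i = 0
--         while i < len(y_filtered):
--             if y_filtered[i] == 1:
--                 gap_start = i + 1
--                 while gap_start < len(y_filtered) and y_filtered[gap_start] == 0:
--                     gap_start += 1
--                 gap_len = gap_start - i - 1
--                 if 0 < gap_len <= max_gap and gap_start < len(y_filtered):
--                     if y_filtered[gap_start] == 1:
--                         y_filtered[i + 1:gap_start] = 1
--                 i = gap_start
--             else:
--                 i += 1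
--
--     return y_filtered
-- ===== SOURCE B (Python) =====
-- def _runs(y):
--     """Run-length table over the is-zero view of y: list of (is_zero, start, end)."""
--     runs = []
--     for i in range(len(y)):
--         z = (y[i] == 0)
--         if runs and runs[-1][0] == z:
--             runs[-1] = (z, runs[-1][1], i + 1)
--         else:
--             runs.append((z, i, i + 1))
--     return runs
--
--
-- def _apply_bout_filtering(y_pred, min_bout, min_after_bout, max_gap):
--     """Runs-table reimplementation: zero out short bouts, then bridge short interior gaps."""
--     y = y_pred.copy()
--     n = len(y)
--     # pass 1: inside each zero-free run, the bout starts at its first 1; drop it if short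
--     for z, s, e in _runs(y):
--         if not z:
--             t = next((k for k in range(s, e) if y[k] == 1), None)
--             if t is not None and e - t < min_bout:
--                 y[t:e] = [0] * (e - t)
--     # pass 2: bridge zero-runs flanked by literal 1s (runs recomputed: pass 1 changed them)
--     if max_gap > 0:
--         for z, s, e in _runs(y):
--             if z and 0 < s and e < n and e - s <= max_gap and y[s - 1] == 1 and y[e] == 1:
--                 y[s:e] = [1] * (e - s)
--     return y
-- ===== Notes on version B (the rewrite author's own statement) =====
-- stated objective: alternative
-- what changed: B replaces A's stateful index scan and nested while-loops with two passes over a run-length table of the is-zero view (zero short bouts, recompute runs, bridge flanked gaps).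
-- crash fix: A was written for numpy arrays: on a Python list every input that triggers an edit (a bout shorter than min_bout, or a gap of length <= max_gap flanked by 1s) makes its scalar slice assignment raise TypeError, while B performs the edit and returns the filtered list; where A returns, it returns its input unchanged and B matches it. — e.g. on _apply_bout_filtering([1, 0, 1], 2, 0, 1): A raises TypeError, B returns [0, 0, 0]
import Mathlib
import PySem

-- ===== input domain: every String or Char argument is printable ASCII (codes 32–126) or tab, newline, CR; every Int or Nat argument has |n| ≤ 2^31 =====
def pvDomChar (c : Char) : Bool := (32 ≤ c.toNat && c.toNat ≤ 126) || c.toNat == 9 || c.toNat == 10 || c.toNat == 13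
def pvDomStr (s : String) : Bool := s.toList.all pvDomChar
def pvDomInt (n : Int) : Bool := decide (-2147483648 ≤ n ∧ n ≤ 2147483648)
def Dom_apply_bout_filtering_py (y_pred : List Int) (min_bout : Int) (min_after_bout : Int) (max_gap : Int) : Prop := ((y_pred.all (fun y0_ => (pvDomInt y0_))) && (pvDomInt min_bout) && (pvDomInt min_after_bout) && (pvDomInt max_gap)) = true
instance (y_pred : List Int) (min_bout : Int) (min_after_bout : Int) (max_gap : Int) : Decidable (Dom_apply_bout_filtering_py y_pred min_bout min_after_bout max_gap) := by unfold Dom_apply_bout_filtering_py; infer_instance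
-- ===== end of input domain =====

-- B rewrites A's stateful index scan + while-loop as two passes over a run-length table of
-- the is-zero view (objective: alternative decomposition).  A was written for numpy arrays:
-- on a Python list its scalar slice assignments raise TypeError whenever an edit triggers,
-- so A either raises or returns its input unchanged; the return-value equivalence is proved
-- on Pre_ (exactly where A returns), and Raises_ documents that B returns the intended
-- filtered list where A raises.

-- ===== PORT A =====
-- numpy-style scalar slice assignment y[a:b] = v (exact for 0 ≤ a,b; A only uses in-range Nat bounds)
def pvSetSlice (y : List Int) (a b : Nat) (v : Int) : List Int :=
  y.mapIdx (fun i x => if a ≤ i ∧ i < b then v else x)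

theorem pvSetSlice_length (y : List Int) (a b : Nat) (v : Int) :
    (pvSetSlice y a b v).length = y.length := by
  simp [pvSetSlice]

-- one iteration of A's first for-loop; state = (y_filtered, in_bout, bout_start)
def pvAStep (min_bout : Int) (st : List Int × Bool × Nat) (i : Nat) : List Int × Bool × Nat :=
  if st.1.getD i 0 = 1 ∧ st.2.1 = false then (st.1, true, i)
  else if st.1.getD i 0 = 0 ∧ st.2.1 = true then
    ((if (i : Int) - (st.2.2 : Int) < min_bout then pvSetSlice st.1 st.2.2 i 0 else st.1),
     false, st.2.2)
  else st

-- the inner 'while gap_start < len and y[gap_start] == 0' loop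
def pvSkipZeros (y : List Int) (g : Nat) : Nat :=
  if h : g < y.length ∧ y.getD g 0 = 0 then pvSkipZeros y (g + 1) else g
termination_by y.length - g
decreasing_by omega

theorem pvSkipZeros_ge (y : List Int) (g : Nat) : g ≤ pvSkipZeros y g := by
  fun_induction pvSkipZeros y g with
  | case1 g h ih => omega
  | case2 g h => omega

-- A's outer while-loop (the max_gap pass)
def pvPass2 (max_gap : Int) (y : List Int) (i : Nat) : List Int :=
  if h : i < y.length then
    if y.getD i 0 = 1 then
      pvPass2 max_gap
        (if 0 < (pvSkipZeros y (i + 1) : Int) - (i : Int) - 1 ∧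
            (pvSkipZeros y (i + 1) : Int) - (i : Int) - 1 ≤ max_gap ∧
            pvSkipZeros y (i + 1) < y.length then
           (if y.getD (pvSkipZeros y (i + 1)) 0 = 1 then
              pvSetSlice y (i + 1) (pvSkipZeros y (i + 1)) 1
            else y)
         else y)
        (pvSkipZeros y (i + 1))
    else pvPass2 max_gap y (i + 1)
  else y
termination_by y.length - i
decreasing_by
  · have hge := pvSkipZeros_ge y (i + 1)
    split <;> [skip; omega] <;> split <;> simp [pvSetSlice_length] <;> omega
  · omega

def apply_bout_filtering_py (y_pred : List Int) (min_bout : Int) (min_after_bout : Int) (max_gap : Int) : List Int :=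
  let st := (List.range y_pred.length).foldl (pvAStep min_bout) (y_pred, false, 0)
  let y1 :=
    if st.2.1 = true ∧ (y_pred.length : Int) - (st.2.2 : Int) < min_bout then
      pvSetSlice st.1 st.2.2 st.1.length 0
    else st.1
  if max_gap > 0 then pvPass2 max_gap y1 0 else y1

-- ===== PORT B =====
-- run-length table of the is-zero view: (is_zero, start, end), built left to right
def pvRuns (y : List Int) : List (Bool × Nat × Nat) :=
  (List.range y.length).foldl
    (fun runs i =>
      match runs.getLast? with
      | some r =>
          if r.1 = decide (y.getD i 0 = 0) then runs.dropLast ++ [(r.1, r.2.1, i + 1)]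
          else runs ++ [(decide (y.getD i 0 = 0), i, i + 1)]
      | none => [(decide (y.getD i 0 = 0), i, i + 1)]) []

-- next((k for k in range(s, e) if y[k] == 1), None)
def pvFirstOne (y : List Int) (s e : Nat) : Option Nat :=
  (List.range' s (e - s)).find? (fun k => y.getD k 0 = 1)

-- y[s:e] = [v] * (e - s)
def pvBSlice (y : List Int) (s e : Nat) (v : Int) : List Int :=
  y.take s ++ List.replicate (min e y.length - min s y.length) v ++ y.drop e

-- pass-1 body: drop the bout (first 1 of a zero-free run up to its end) if it is short
def pvBPass1Step (min_bout : Int) (y : List Int) (r : Bool × Nat × Nat) : List Int :=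
  if r.1 = false then
    match pvFirstOne y r.2.1 r.2.2 with
    | some t => if (r.2.2 : Int) - (t : Int) < min_bout then pvBSlice y t r.2.2 0 else y
    | none => y
  else y

-- pass-2 body: bridge an interior zero-run flanked by literal 1s
def pvBPass2Step (n : Nat) (max_gap : Int) (y : List Int) (r : Bool × Nat × Nat) : List Int :=
  if r.1 = true ∧ 0 < r.2.1 ∧ r.2.2 < n ∧ (r.2.2 : Int) - (r.2.1 : Int) ≤ max_gap ∧
     y.getD (r.2.1 - 1) 0 = 1 ∧ y.getD r.2.2 0 = 1
  then pvBSlice y r.2.1 r.2.2 1 else y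

def apply_bout_filtering_py_alt (y_pred : List Int) (min_bout : Int) (min_after_bout : Int) (max_gap : Int) : List Int :=
  let n := y_pred.length
  let y1 := (pvRuns y_pred).foldl (pvBPass1Step min_bout) y_pred
  if max_gap > 0 then (pvRuns y1).foldl (pvBPass2Step n max_gap) y1 else y1

-- ===== PRECONDITION & SPEC =====
-- t starts a bout: y[t] == 1 and no earlier 1 in the same zero-free segment
def pvBoutStart (y : List Int) (t : Nat) : Prop :=
  y.getD t 0 = 1 ∧ ∀ k, k < t → y.getD k 0 = 1 → ∃ m, m < t ∧ k < m ∧ y.getD m 0 = 0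

-- a bout runs from its start t to the next 0 (or the end of the list)
def pvBoutAt (y : List Int) (t e : Nat) : Prop :=
  t < e ∧ e ≤ y.length ∧ pvBoutStart y t ∧ (∀ m, m < e → t ≤ m → y.getD m 0 ≠ 0) ∧
  (e = y.length ∨ y.getD e 0 = 0)

-- an interior zero-gap [s, e) flanked by literal 1s
def pvGapAt (y : List Int) (s e : Nat) : Prop :=
  0 < s ∧ s < e ∧ e < y.length ∧ y.getD (s - 1) 0 = 1 ∧ y.getD e 0 = 1 ∧
  (∀ m, m < e → s ≤ m → y.getD m 0 = 0)

-- Pre_: exactly the inputs on which the Python A RETURNS (it returns its input unchanged there).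
-- On every other input A's numpy-style scalar slice assignment fires and raises TypeError on a
-- Python list, so no input on which A returns is excluded: every bout is long enough, and when
-- max_gap > 0 no bridgeable interior gap exists.
def Pre_apply_bout_filtering_py (y_pred : List Int) (min_bout : Int) (min_after_bout : Int) (max_gap : Int) : Prop :=
  (∀ t, t < y_pred.length → ∀ e, e ≤ y_pred.length → pvBoutAt y_pred t e →
      min_bout ≤ (e : Int) - (t : Int)) ∧
  (0 < max_gap → ∀ s, s < y_pred.length → ∀ e, e < y_pred.length → pvGapAt y_pred s e →
      max_gap < (e : Int) - (s : Int))

instance (y_pred : List Int) (min_bout : Int) (min_after_bout : Int) (max_gap : Int) : Decidable (Pre_apply_bout_filtering_py y_pred min_bout min_after_bout max_gap) := by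
  unfold Pre_apply_bout_filtering_py pvBoutAt pvBoutStart pvGapAt
  exact instDecidableAnd
    (dp := @Nat.decidableBallLT _ _ (fun t _ => @Nat.decidableBallLE _ _ (fun e _ => inferInstance)))

def pvWitness_apply_bout_filtering_py : List Int × Int × Int × Int := ([1, 1, 0, 0, 1, 1], 2, 0, 1)

-- A raises TypeError (scalar slice assignment on a list) on every input where an edit triggers —
-- some bout shorter than min_bout, or (max_gap > 0) an interior gap of length ≤ max_gap flanked
-- by 1s; B performs the edit and returns the filtered list there.
def Raises_apply_bout_filtering_py (y_pred : List Int) (min_bout : Int) (min_after_bout : Int) (max_gap : Int) : Prop :=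
  ¬ Pre_apply_bout_filtering_py y_pred min_bout min_after_bout max_gap

instance (y_pred : List Int) (min_bout : Int) (min_after_bout : Int) (max_gap : Int) : Decidable (Raises_apply_bout_filtering_py y_pred min_bout min_after_bout max_gap) := by
  unfold Raises_apply_bout_filtering_py; infer_instance

def pvRaiseWitness_apply_bout_filtering_py : List Int × Int × Int × Int := ([1, 0, 1], 2, 0, 1)
def pvRaiseWitnessOut_apply_bout_filtering_py : List Int := [0, 0, 0]

def Spec_apply_bout_filtering_py (y_pred : List Int) (min_bout : Int) (min_after_bout : Int) (max_gap : Int) (out : List Int) : Prop := out = apply_bout_filtering_py_alt y_pred min_bout min_after_bout max_gap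
instance (y_pred : List Int) (min_bout : Int) (min_after_bout : Int) (max_gap : Int) (out : List Int) : Decidable (Spec_apply_bout_filtering_py y_pred min_bout min_after_bout max_gap out) := by unfold Spec_apply_bout_filtering_py; infer_instance

-- ===== CLAIM (what is proved, stated in full; the proofs are below) =====
def Claim_equal_apply_bout_filtering_py : Prop := ∀ (y_pred : List Int) (min_bout : Int) (min_after_bout : Int) (max_gap : Int), Dom_apply_bout_filtering_py y_pred min_bout min_after_bout max_gap → Pre_apply_bout_filtering_py y_pred min_bout min_after_bout max_gap → Spec_apply_bout_filtering_py y_pred min_bout min_after_bout max_gap (apply_bout_filtering_py y_pred min_bout min_after_bout max_gap)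

def Claim_raises_apply_bout_filtering_py : Prop := (∀ (y_pred : List Int) (min_bout : Int) (min_after_bout : Int) (max_gap : Int), Dom_apply_bout_filtering_py y_pred min_bout min_after_bout max_gap → Raises_apply_bout_filtering_py y_pred min_bout min_after_bout max_gap → ¬ Pre_apply_bout_filtering_py y_pred min_bout min_after_bout max_gap) ∧ (Dom_apply_bout_filtering_py (pvRaiseWitness_apply_bout_filtering_py.1) (pvRaiseWitness_apply_bout_filtering_py.2.1) (pvRaiseWitness_apply_bout_filtering_py.2.2.1) (pvRaiseWitness_apply_bout_filtering_py.2.2.2) ∧ Raises_apply_bout_filtering_py (pvRaiseWitness_apply_bout_filtering_py.1) (pvRaiseWitness_apply_bout_filtering_py.2.1) (pvRaiseWitness_apply_bout_filtering_py.2.2.1) (pvRaiseWitness_apply_bout_filtering_py.2.2.2) ∧ apply_bout_filtering_py_alt (pvRaiseWitness_apply_bout_filtering_py.1) (pvRaiseWitness_apply_bout_filtering_py.2.1) (pvRaiseWitness_apply_bout_filtering_py.2.2.1) (pvRaiseWitness_apply_bout_filtering_py.2.2.2) = pvRaiseWitnessOut_apply_bout_filtering_py)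

-- ===== LEMMAS AND PROOFS =====

-- l.foldl f b = b when every step fixes b
theorem pvFoldlFixed {α β : Type} (f : β → α → β) (b : β) (l : List α)
    (h : ∀ x ∈ l, f b x = b) : l.foldl f b = b := by
  induction l with
  | nil => rfl
  | cons a l ih =>
    simp only [List.foldl_cons, h a (by simp)]
    exact ih (fun x hx => h x (by simp [hx]))

theorem pvBoolNeEqNot {a b : Bool} (h : ¬a = b) : a = !b := by
  cases a <;> cases b <;> simp_all

-- 'rs covers [a, b) as a chain of constant runs, alternating with previous class pz'
def pvCov (y : List Int) : Nat → Option Bool → List (Bool × Nat × Nat) → Nat → Prop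
  | a, _, [], b => a = b
  | a, pz, (z, s, e) :: rest, b =>
      s = a ∧ a < e ∧ (∀ m, m < e → a ≤ m → decide (y.getD m 0 = 0) = z) ∧
      pz ≠ some z ∧ pvCov y e (some z) rest b

def pvEndZ (pz : Option Bool) : List (Bool × Nat × Nat) → Option Bool
  | [] => pz
  | r :: rest => pvEndZ (some r.1) rest

theorem pvEndZ_concat (pz : Option Bool) (rs : List (Bool × Nat × Nat)) (r : Bool × Nat × Nat) :
    pvEndZ pz (rs ++ [r]) = some r.1 := by
  induction rs generalizing pz with
  | nil => rfl
  | cons x l ih => exact ih (some x.1)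

theorem pvCov_le (y : List Int) (rs : List (Bool × Nat × Nat)) :
    ∀ a pz b, pvCov y a pz rs b → a ≤ b := by
  induction rs with
  | nil => intro a pz b h; simp [pvCov] at h; omega
  | cons r rest ih =>
    obtain ⟨z, s, e⟩ := r
    intro a pz b h
    obtain ⟨_, hlt, _, _, hrest⟩ := h
    have := ih e (some z) b hrest
    omega

theorem pvCov_snoc (y : List Int) (rs : List (Bool × Nat × Nat)) :
    ∀ a pz b z e, pvCov y a pz rs b → pvEndZ pz rs ≠ some z → b < e →
      (∀ m, m < e → b ≤ m → decide (y.getD m 0 = 0) = z) →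
      pvCov y a pz (rs ++ [(z, b, e)]) e := by
  induction rs with
  | nil =>
    intro a pz b z e hcov hz hlt hconst
    simp [pvCov] at hcov
    subst hcov
    exact ⟨rfl, hlt, hconst, hz, rfl⟩
  | cons r rest ih =>
    obtain ⟨z', s', e'⟩ := r
    intro a pz b z e hcov hz hlt hconst
    obtain ⟨hs, hlt', hconst', hne, hrest⟩ := hcov
    exact ⟨hs, hlt', hconst', hne, ih e' (some z') b z e hrest hz hlt hconst⟩

-- per-run facts extracted from a full cover
def pvRunFacts (y : List Int) (r : Bool × Nat × Nat) : Prop :=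
  r.2.1 < r.2.2 ∧ r.2.2 ≤ y.length ∧
  (∀ m, m < r.2.2 → r.2.1 ≤ m → decide (y.getD m 0 = 0) = r.1) ∧
  (0 < r.2.1 → decide (y.getD (r.2.1 - 1) 0 = 0) = !r.1) ∧
  (r.2.2 < y.length → decide (y.getD r.2.2 0 = 0) = !r.1)

theorem pvCov_facts (y : List Int) (rs : List (Bool × Nat × Nat)) :
    ∀ a pz, pvCov y a pz rs y.length →
      (pz = none → a = 0) →
      (∀ z0, pz = some z0 → 0 < a ∧ decide (y.getD (a - 1) 0 = 0) = z0) →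
      ∀ r ∈ rs, pvRunFacts y r := by
  induction rs with
  | nil => intro a pz _ _ _ r hr; simp at hr
  | cons r0 rest ih =>
    obtain ⟨z, s, e⟩ := r0
    intro a pz hcov hnone hsome r hr
    obtain ⟨hs, hlt, hconst, hne, hrest⟩ := hcov
    subst hs
    have he_len : e ≤ y.length := pvCov_le y rest e (some z) y.length hrest
    rcases List.mem_cons.mp hr with heq | hmem
    · subst heq
      unfold pvRunFacts
      dsimp only
      refine ⟨hlt, he_len, hconst, ?_, ?_⟩
      · intro hpos
        cases hpz : pz with
        | none => exact absurd (hnone hpz) (by omega)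
        | some z0 =>
          obtain ⟨_, hb⟩ := hsome z0 hpz
          have hz0 : ¬z0 = z := fun h => hne (by rw [hpz, h])
          rw [hb]
          exact pvBoolNeEqNot hz0
      · intro he_lt
        cases hrest' : rest with
        | nil => rw [hrest'] at hrest; simp [pvCov] at hrest; omega
        | cons r1 rest1 =>
          obtain ⟨z1, s1, e1⟩ := r1
          rw [hrest'] at hrest
          obtain ⟨hs1, hlt1, hconst1, hne1, _⟩ := hrest
          have hy := hconst1 e hlt1 (le_refl e)
          have hz1 : ¬z1 = z := fun h => hne1 (by rw [h])
          rw [hy]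
          exact pvBoolNeEqNot hz1
    · refine ih e (some z) hrest (by simp) ?_ r hmem
      intro z0 hz0
      injection hz0 with hz0
      subst hz0
      refine ⟨by omega, ?_⟩
      have := hconst (e - 1) (by omega) (by omega)
      exact this
-- invariant of the pvRuns fold
def pvRunsStep (y : List Int) (runs : List (Bool × Nat × Nat)) (i : Nat) : List (Bool × Nat × Nat) :=
  match runs.getLast? with
  | some r =>
      if r.1 = decide (y.getD i 0 = 0) then runs.dropLast ++ [(r.1, r.2.1, i + 1)]
      else runs ++ [(decide (y.getD i 0 = 0), i, i + 1)]
  | none => [(decide (y.getD i 0 = 0), i, i + 1)]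

theorem pvRuns_eq_foldl (y : List Int) :
    pvRuns y = (List.range y.length).foldl (pvRunsStep y) [] := rfl

def pvRunsInv (y : List Int) (i : Nat) (rs : List (Bool × Nat × Nat)) : Prop :=
  (rs = [] ∧ i = 0) ∨
  ∃ rs₀ z s, rs = rs₀ ++ [(z, s, i)] ∧ s < i ∧ pvCov y 0 none rs₀ s ∧
    pvEndZ none rs₀ ≠ some z ∧ (∀ m, m < i → s ≤ m → decide (y.getD m 0 = 0) = z)

theorem pvRunsInv_step (y : List Int) (i : Nat) (rs : List (Bool × Nat × Nat))
    (hinv : pvRunsInv y i rs) : pvRunsInv y (i + 1) (pvRunsStep y rs i) := by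
  rcases hinv with ⟨hnil, hi⟩ | ⟨rs₀, z, s, hrs, hlt, hcov, hz, hconst⟩
  · subst hnil; subst hi
    right
    refine ⟨[], decide (y.getD 0 0 = 0), 0, rfl, by omega, rfl, by simp [pvEndZ], ?_⟩
    intro m h1 _
    have : m = 0 := by omega
    subst this; rfl
  · subst hrs
    unfold pvRunsStep
    rw [List.getLast?_concat]
    dsimp only
    by_cases hmatch : z = decide (y.getD i 0 = 0)
    · rw [if_pos hmatch, List.dropLast_concat]
      right
      refine ⟨rs₀, z, s, by rw [hmatch], by omega, hcov, hz, ?_⟩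
      intro m h1 h2
      rcases Nat.lt_or_ge m i with hm | hm
      · exact hconst m hm h2
      · have : m = i := by omega
        subst this; exact hmatch.symm
    · rw [if_neg hmatch]
      right
      refine ⟨rs₀ ++ [(z, s, i)], decide (y.getD i 0 = 0), i, by simp, by omega, ?_, ?_, ?_⟩
      · exact pvCov_snoc y rs₀ 0 none s z i hcov hz hlt hconst
      · rw [pvEndZ_concat]
        intro hcontra
        injection hcontra with h
        exact hmatch h
      · intro m h1 h2
        have : m = i := by omega
        subst this; rfl

theorem pvRuns_facts (y : List Int) : ∀ r ∈ pvRuns y, pvRunFacts y r := by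
  have key : ∀ j, (j ≤ y.length) → pvRunsInv y j ((List.range j).foldl (pvRunsStep y) []) := by
    intro j
    induction j with
    | zero => intro _; left; exact ⟨rfl, rfl⟩
    | succ j ih =>
      intro hj
      rw [List.range_succ, List.foldl_append]
      exact pvRunsInv_step y j _ (ih (by omega))
  have hinv := key y.length (le_refl _)
  rw [pvRuns_eq_foldl]
  rcases hinv with ⟨hnil, _⟩ | ⟨rs₀, z, s, hrs, hlt, hcov, hz, hconst⟩
  · rw [hnil]; intro r hr; simp at hr
  · rw [hrs]
    have hcov' : pvCov y 0 none (rs₀ ++ [(z, s, y.length)]) y.length :=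
      pvCov_snoc y rs₀ 0 none s z y.length hcov hz hlt hconst
    exact pvCov_facts y _ 0 none hcov' (fun _ => rfl) (fun z0 h => by simp at h)

-- minimality of find? over range'
theorem pvFind?_range' (p : Nat → Bool) :
    ∀ (n s t : Nat), (List.range' s n).find? p = some t →
      p t = true ∧ s ≤ t ∧ t < s + n ∧ ∀ k, s ≤ k → k < t → p k = false := by
  intro n
  induction n with
  | zero => intro s t h; simp at h
  | succ n ih =>
    intro s t h
    rw [List.range'_succ] at h
    cases hp : p s with
    | true =>
      rw [List.find?_cons_of_pos hp] at h
      injection h with h; subst h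
      exact ⟨hp, le_refl _, by omega, fun k h1 h2 => by omega⟩
    | false =>
      rw [List.find?_cons_of_neg (by simp [hp])] at h
      obtain ⟨h1, h2, h3, h4⟩ := ih (s + 1) t h
      refine ⟨h1, by omega, by omega, ?_⟩
      intro k hk1 hk2
      rcases Nat.lt_or_ge k (s + 1) with hk | hk
      · have : k = s := by omega
        subst this; exact hp
      · exact h4 k hk hk2

-- ----- A side: under Pre_, the scan makes no edit and returns its input -----

theorem pvSkipZeros_zero (y : List Int) (g : Nat) :
    ∀ m, g ≤ m → m < pvSkipZeros y g → y.getD m 0 = 0 := by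
  fun_induction pvSkipZeros y g with
  | case1 g h ih =>
    intro m h1 h2
    rcases Nat.lt_or_ge m (g + 1) with hm | hm
    · have : m = g := by omega
      subst this; exact h.2
    · exact ih m hm h2
  | case2 g h =>
    intro m h1 h2
    omega

def pvAInvState (y : List Int) (j : Nat) (st : List Int × Bool × Nat) : Prop :=
  st.1 = y ∧
  (st.2.1 = true → st.2.2 < j ∧ pvBoutStart y st.2.2 ∧
    ∀ m, m < j → st.2.2 ≤ m → y.getD m 0 ≠ 0) ∧
  (st.2.1 = false → ∀ k, k < j → y.getD k 0 = 1 → ∃ m, m < j ∧ k < m ∧ y.getD m 0 = 0)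

theorem pvA_fold (y : List Int) (mb : Int)
    (hpre1 : ∀ t, t < y.length → ∀ e, e ≤ y.length → pvBoutAt y t e →
        mb ≤ (e : Int) - (t : Int)) :
    ∀ j, j ≤ y.length → pvAInvState y j ((List.range j).foldl (pvAStep mb) (y, false, 0)) := by
  intro j
  induction j with
  | zero =>
    intro _
    refine ⟨rfl, fun h => by simp at h, fun _ k hk => by omega⟩
  | succ j ih =>
    intro hj
    rw [List.range_succ, List.foldl_append, List.foldl_cons, List.foldl_nil]
    rcases hstate : (List.range j).foldl (pvAStep mb) (y, false, 0) with ⟨y', ib, bs⟩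
    obtain ⟨hy, htrue, hfalse⟩ := hstate ▸ ih (by omega)
    dsimp only at hy htrue hfalse
    subst hy
    unfold pvAStep
    dsimp only
    by_cases hc1 : y'.getD j 0 = 1 ∧ ib = false
    · rw [if_pos hc1]
      unfold pvAInvState
      dsimp only
      refine ⟨rfl, ?_, fun h => by simp at h⟩
      intro _
      refine ⟨by omega, ⟨hc1.1, fun k hk hk1 => ?_⟩, ?_⟩
      · obtain ⟨m, hm1, hm2, hm3⟩ := hfalse hc1.2 k hk hk1
        exact ⟨m, hm1, hm2, hm3⟩
      · intro m h1 h2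
        have : m = j := by omega
        subst this
        rw [hc1.1]
        norm_num
    · rw [if_neg hc1]
      by_cases hc2 : y'.getD j 0 = 0 ∧ ib = true
      · rw [if_pos hc2]
        obtain ⟨hbs, hstart, hzf⟩ := htrue hc2.2
        have hbout : pvBoutAt y' bs j :=
          ⟨hbs, by omega, hstart, hzf, Or.inr hc2.1⟩
        have hge := hpre1 bs (by omega) j (by omega) hbout
        rw [if_neg (by omega)]
        unfold pvAInvState
        dsimp only
        refine ⟨rfl, fun h => by simp at h, ?_⟩
        intro _ k hk hk1
        rcases Nat.lt_or_ge k bs with hkb | hkb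
        · obtain ⟨m, hm1, hm2, hm3⟩ := hstart.2 k hkb hk1
          exact ⟨m, by omega, hm2, hm3⟩
        · by_cases hkj : k = j
          · subst hkj
            rw [hc2.1] at hk1
            norm_num at hk1
          · exact ⟨j, by omega, by omega, hc2.1⟩
      · rw [if_neg hc2]
        unfold pvAInvState
        dsimp only
        refine ⟨rfl, ?_, ?_⟩
        · intro hib
          obtain ⟨hbs, hstart, hzf⟩ := htrue hib
          refine ⟨by omega, hstart, ?_⟩
          intro m h1 h2
          by_cases hmj : m = j
          · subst hmj
            intro h0
            exact hc2 ⟨h0, hib⟩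
          · exact hzf m (by omega) h2
        · intro hib k hk hk1
          by_cases hkj : k = j
          · subst hkj
            exact absurd ⟨hk1, hib⟩ hc1
          · obtain ⟨m, hm1, hm2, hm3⟩ := hfalse hib k (by omega) hk1
            exact ⟨m, by omega, hm2, hm3⟩

theorem pvPass2_id (y : List Int) (mg : Int)
    (hpre2 : ∀ s, s < y.length → ∀ e, e < y.length → pvGapAt y s e →
        mg < (e : Int) - (s : Int)) :
    ∀ k i, y.length - i ≤ k → pvPass2 mg y i = y := by
  intro k
  induction k with
  | zero =>
    intro i hi
    rw [pvPass2, dif_neg (by omega)]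
  | succ k ih =>
    intro i hi
    rw [pvPass2]
    by_cases hil : i < y.length
    · rw [dif_pos hil]
      by_cases h1 : y.getD i 0 = 1
      · rw [if_pos h1]
        have hge := pvSkipZeros_ge y (i + 1)
        have hcollapse :
            (if 0 < (pvSkipZeros y (i + 1) : Int) - (i : Int) - 1 ∧
                (pvSkipZeros y (i + 1) : Int) - (i : Int) - 1 ≤ mg ∧
                pvSkipZeros y (i + 1) < y.length then
               (if y.getD (pvSkipZeros y (i + 1)) 0 = 1 then
                  pvSetSlice y (i + 1) (pvSkipZeros y (i + 1)) 1
                else y)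
             else y) = y := by
          split_ifs with hC hD
          · exfalso
            obtain ⟨hC1, hC2, hC3⟩ := hC
            have hgap : pvGapAt y (i + 1) (pvSkipZeros y (i + 1)) := by
              refine ⟨by omega, by omega, hC3, ?_, hD, ?_⟩
              · simpa using h1
              · intro m hm1 hm2
                exact pvSkipZeros_zero y (i + 1) m hm2 hm1
            have := hpre2 (i + 1) (by omega) (pvSkipZeros y (i + 1)) hC3 hgap
            omega
          · rfl
          · rfl
        rw [hcollapse]
        exact ih (pvSkipZeros y (i + 1)) (by omega)
      · rw [if_neg h1]
        exact ih (i + 1) (by omega)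
    · rw [dif_neg hil]

theorem pvA_id (y : List Int) (mb ma mg : Int)
    (hpre : Pre_apply_bout_filtering_py y mb ma mg) :
    apply_bout_filtering_py y mb ma mg = y := by
  obtain ⟨hpre1, hpre2⟩ := hpre
  unfold apply_bout_filtering_py
  dsimp only
  set st := (List.range y.length).foldl (pvAStep mb) (y, false, 0) with hstdef
  obtain ⟨hy, htrue, _⟩ := pvA_fold y mb hpre1 y.length (le_refl _)
  have hy1 : (if st.2.1 = true ∧ (y.length : Int) - (st.2.2 : Int) < mb then
      pvSetSlice st.1 st.2.2 st.1.length 0 else st.1) = y := by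
    split_ifs with hc
    · exfalso
      obtain ⟨hib, hlen⟩ := hc
      obtain ⟨hbs, hstart, hzf⟩ := htrue hib
      have hbout : pvBoutAt y st.2.2 y.length :=
        ⟨hbs, le_refl _, hstart, hzf, Or.inl rfl⟩
      have := hpre1 st.2.2 (by omega) y.length (le_refl _) hbout
      omega
    · exact hy
  rw [hy1]
  split_ifs with hmg
  · exact pvPass2_id y mg (hpre2 hmg) y.length 0 (by omega)
  · rfl

-- ----- B side: under Pre_, every runs-table pass step fixes the list -----

theorem pvB_pass1_step (y : List Int) (mb : Int)
    (hpre1 : ∀ t, t < y.length → ∀ e, e ≤ y.length → pvBoutAt y t e →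
        mb ≤ (e : Int) - (t : Int))
    (r : Bool × Nat × Nat) (hr : pvRunFacts y r) :
    pvBPass1Step mb y r = y := by
  obtain ⟨z, s, e⟩ := r
  obtain ⟨hlt, hlen, hconst, hleft, hright⟩ := hr
  dsimp only at hlt hlen hconst hleft hright
  unfold pvBPass1Step
  dsimp only
  by_cases hz : z = false
  · subst hz
    rw [if_pos rfl]
    cases hfind : pvFirstOne y s e with
    | none => rfl
    | some t =>
      dsimp only
      obtain ⟨hpt, hst, hte, hmin⟩ :=
        pvFind?_range' (fun k => decide (y.getD k 0 = 1)) (e - s) s t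
          (by simpa [pvFirstOne] using hfind)
      have hyt : y.getD t 0 = 1 := of_decide_eq_true hpt
      have hzf : ∀ m, m < e → t ≤ m → y.getD m 0 ≠ 0 := by
        intro m h1 h2 h0
        have := hconst m h1 (by omega)
        rw [h0] at this
        simp at this
      have hstart : pvBoutStart y t := by
        refine ⟨hyt, fun k hk hk1 => ?_⟩
        rcases Nat.lt_or_ge k s with hks | hks
        · have hs0 : y.getD (s - 1) 0 = 0 := by
            have := hleft (by omega)
            simpa using this
          by_cases hks1 : k = s - 1
          · subst hks1
            rw [hs0] at hk1
            norm_num at hk1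
          · exact ⟨s - 1, by omega, by omega, hs0⟩
        · exfalso
          have := hmin k hks (by omega)
          rw [decide_eq_false_iff_not] at this
          exact this hk1
      have hend : e = y.length ∨ y.getD e 0 = 0 := by
        rcases Nat.lt_or_ge e y.length with he | he
        · right
          have := hright he
          simpa using this
        · left; omega
      have hbout : pvBoutAt y t e := ⟨by omega, hlen, hstart, hzf, hend⟩
      have := hpre1 t (by omega) e hlen hbout
      rw [if_neg (by omega)]
  · rw [if_neg hz]

theorem pvB_pass2_step (y : List Int) (mg : Int)
    (hpre2 : ∀ s, s < y.length → ∀ e, e < y.length → pvGapAt y s e →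
        mg < (e : Int) - (s : Int))
    (r : Bool × Nat × Nat) (hr : pvRunFacts y r) :
    pvBPass2Step y.length mg y r = y := by
  obtain ⟨z, s, e⟩ := r
  obtain ⟨hlt, hlen, hconst, _, _⟩ := hr
  dsimp only at hlt hlen hconst
  unfold pvBPass2Step
  dsimp only
  split_ifs with hc
  · exfalso
    obtain ⟨hz, hs, hen, hgap, hl, hr1⟩ := hc
    subst hz
    have hgapat : pvGapAt y s e := by
      refine ⟨hs, hlt, hen, hl, hr1, ?_⟩
      intro m h1 h2
      have := hconst m h1 h2
      exact of_decide_eq_true this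
    have := hpre2 s (by omega) e hen hgapat
    omega
  · rfl

theorem pvB_id (y : List Int) (mb ma mg : Int)
    (hpre : Pre_apply_bout_filtering_py y mb ma mg) :
    apply_bout_filtering_py_alt y mb ma mg = y := by
  obtain ⟨hpre1, hpre2⟩ := hpre
  unfold apply_bout_filtering_py_alt
  dsimp only
  have h1 : (pvRuns y).foldl (pvBPass1Step mb) y = y :=
    pvFoldlFixed _ _ _ (fun r hr => pvB_pass1_step y mb hpre1 r (pvRuns_facts y r hr))
  rw [h1]
  split_ifs with hmg
  · exact pvFoldlFixed _ _ _
      (fun r hr => pvB_pass2_step y mg (hpre2 hmg) r (pvRuns_facts y r hr))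
  · rfl

-- ===== VERDICT (by name: the statement is the Claim_ definition above) =====
theorem apply_bout_filtering_py_spec : Claim_equal_apply_bout_filtering_py := by
  intro y mb ma mg _ hpre
  unfold Spec_apply_bout_filtering_py
  rw [pvA_id y mb ma mg hpre, pvB_id y mb ma mg hpre]

@[simp] theorem apply_bout_filtering_py_raises : Claim_raises_apply_bout_filtering_py := by
  unfold Claim_raises_apply_bout_filtering_py
  exact ⟨fun _ _ _ _ _ hr => hr, by decide⟩
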